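-- pv_equiv track=rewrite | github.com/Perledition/SFRT | src/feedme_service/ner/utils.py | replace_string_numbers_with_numbers
-- ===== SOURCE A (Python) =====
-- def replace_string_numbers_with_numbers(word_list: list, replace_index_map: dict):
--     length = len(word_list)
--     diff = 0
--     for i, (replace_word, ix) in enumerate(replace_index_map.items()):
--         ix = [n + diff for n in ix]
--
--         start = word_list[:min(ix)]
--         end = word_list[max(ix) + 1:]
--
--         word_list = start + [replace_word] + end
--         diff = len(word_list) - length
--         length = len(word_list)
--
--     return word_list
-- ===== SOURCE B (Python) =====
-- # Piece-table rewrite: keeps the list as segments, splitting at the clamped slice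
-- # boundaries instead of rebuilding the whole list for every replacement.
--
-- def _clamp(i, total):
--     if i < 0:
--         i += total
--     if i < 0:
--         return 0
--     if i > total:
--         return total
--     return i
--
--
-- def _take_pieces(pieces, n):
--     out = []
--     for p in pieces:
--         if n == 0:
--             break
--         if len(p) <= n:
--             out.append(p)
--             n -= len(p)
--         else:
--             out.append(p[:n])
--             break
--     return out
--
--
-- def _drop_pieces(pieces, n):
--     for k, p in enumerate(pieces):
--         if n < len(p):
--             return [p[n:]] + pieces[k + 1:]
--         n -= len(p)
--     return []
--
--
-- def replace_string_numbers_with_numbers(word_list: list, replace_index_map: dict):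
--     pieces = [list(word_list)]
--     total = len(word_list)
--     diff = 0
--     for word, ix in replace_index_map.items():
--         s = _clamp(min(ix) + diff, total)
--         e = _clamp(max(ix) + diff + 1, total)
--         pieces = _take_pieces(pieces, s) + [[word]] + _drop_pieces(pieces, e)
--         new_total = s + 1 + (total - e)
--         diff = new_total - total
--         total = new_total
--     return [w for p in pieces for w in p]
-- ===== Notes on version B (the rewrite author's own statement) =====
-- stated objective: alternative
-- what changed: A rebuilds the whole word list with two full-list slices for every map entry; B keeps the list as a piece table (list of segments), splits it at the clamped slice boundaries computed with explicit index arithmetic, and flattens once at the end.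
import Mathlib
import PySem

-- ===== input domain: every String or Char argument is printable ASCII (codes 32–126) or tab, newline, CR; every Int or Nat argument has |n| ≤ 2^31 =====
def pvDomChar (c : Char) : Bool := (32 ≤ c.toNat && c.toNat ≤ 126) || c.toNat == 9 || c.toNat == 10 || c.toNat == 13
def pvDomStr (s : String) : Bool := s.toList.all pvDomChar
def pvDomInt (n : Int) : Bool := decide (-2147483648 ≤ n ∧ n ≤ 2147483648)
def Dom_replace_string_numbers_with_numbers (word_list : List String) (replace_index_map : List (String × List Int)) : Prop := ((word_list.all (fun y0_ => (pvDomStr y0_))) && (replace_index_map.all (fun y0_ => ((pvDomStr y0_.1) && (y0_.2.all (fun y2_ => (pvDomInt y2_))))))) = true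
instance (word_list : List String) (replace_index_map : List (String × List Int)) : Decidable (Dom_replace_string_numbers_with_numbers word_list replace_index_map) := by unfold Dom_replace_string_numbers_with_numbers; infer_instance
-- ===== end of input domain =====

-- B replaces A's whole-list rebuild per entry by a piece table (list of segments)
-- split at the clamped slice boundaries; the return value is the same ("alternative").

-- ===== PORT A =====
-- A's loop state: (word_list, length, diff); each step slices the whole current list.
def replace_string_numbers_with_numbers (word_list : List String) (replace_index_map : List (String × List Int)) : List String :=
  (replace_index_map.foldl
    (fun (st : List String × Int × Int) item =>
      let wl := st.1
      let length := st.2.1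
      let diff := st.2.2
      let ix := item.2.map (fun n => n + diff)
      match PySem.List.min? ix (fun y => y), PySem.List.max? ix (fun y => y) with
      | some lo, some hi =>
        let start := PySem.List.slice wl none (some lo)
        let end_ := PySem.List.slice wl (some (hi + 1)) none
        let wl' := start ++ [item.1] ++ end_
        (wl', (wl'.length : Int), (wl'.length : Int) - length)
      | _, _ => st)  -- min()/max() of an empty list raise in Python: outside Pre_
    (word_list, (word_list.length : Int), 0)).1

-- ===== PORT B =====
-- B-side helpers: clamp an index the way a Python slice bound clamps, and split a piece list.
def pvClamp (i : Int) (total : Nat) : Nat :=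
  let j : Int := if i < 0 then i + total else i
  if j < 0 then 0 else if j > (total : Int) then total else j.toNat

def pvTakePieces : List (List String) → Nat → List (List String)
  | [], _ => []
  | p :: ps, n =>
    if n = 0 then []
    else if p.length ≤ n then p :: pvTakePieces ps (n - p.length)
    else [p.take n]

def pvDropPieces : List (List String) → Nat → List (List String)
  | [], _ => []
  | p :: ps, n =>
    if n < p.length then p.drop n :: ps
    else pvDropPieces ps (n - p.length)

def replace_string_numbers_with_numbers_alt (word_list : List String) (replace_index_map : List (String × List Int)) : List String :=
  (replace_index_map.foldl
    (fun (st : List (List String) × Nat × Int) item =>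
      let pieces := st.1
      let total := st.2.1
      let diff := st.2.2
      match PySem.List.min? item.2 (fun y => y) with
      | none => st  -- min() of an empty list raises in Python: outside Pre_
      | some mn =>
        match PySem.List.max? item.2 (fun y => y) with
        | none => st
        | some mx =>
          let s := pvClamp (mn + diff) total
          let e := pvClamp (mx + diff + 1) total
          let pieces' := pvTakePieces pieces s ++ [item.1] :: pvDropPieces pieces e
          let total' := s + 1 + (total - e)
          (pieces', total', (total' : Int) - (total : Int)))
    ([word_list], word_list.length, 0)).1.flatten

-- ===== PRECONDITION & SPEC =====
-- Pre_ excludes entries with an empty index list, on which Python's min() raises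
-- ValueError (in both A and B).
def Pre_replace_string_numbers_with_numbers (word_list : List String) (replace_index_map : List (String × List Int)) : Prop :=
  ∀ p ∈ replace_index_map, p.2 ≠ []
instance (word_list : List String) (replace_index_map : List (String × List Int)) : Decidable (Pre_replace_string_numbers_with_numbers word_list replace_index_map) := by unfold Pre_replace_string_numbers_with_numbers; infer_instance

def pvWitness_replace_string_numbers_with_numbers : List String × (List (String × List Int)) :=
  (["a", "b", "c"], [("X", [1]), ("Y", [0, 2])])

def Spec_replace_string_numbers_with_numbers (word_list : List String) (replace_index_map : List (String × List Int)) (out : List String) : Prop := out = replace_string_numbers_with_numbers_alt word_list replace_index_map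
instance (word_list : List String) (replace_index_map : List (String × List Int)) (out : List String) : Decidable (Spec_replace_string_numbers_with_numbers word_list replace_index_map out) := by unfold Spec_replace_string_numbers_with_numbers; infer_instance

-- ===== CLAIM (what is proved, stated in full; the proofs are below) =====
def Claim_equal_replace_string_numbers_with_numbers : Prop := ∀ (word_list : List String) (replace_index_map : List (String × List Int)), Dom_replace_string_numbers_with_numbers word_list replace_index_map → Pre_replace_string_numbers_with_numbers word_list replace_index_map → Spec_replace_string_numbers_with_numbers word_list replace_index_map (replace_string_numbers_with_numbers word_list replace_index_map)

-- ===== LEMMAS AND PROOFS =====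

theorem pvClamp_eq (i : Int) (n : Nat) : pvClamp i n = PySem.List.clampIdx n i := by
  simp only [pvClamp, PySem.List.clampIdx]
  split_ifs <;> omega

theorem pvClamp_le (i : Int) (n : Nat) : pvClamp i n ≤ n := by
  simp only [pvClamp]
  split_ifs <;> omega

theorem flatten_pvTakePieces (ps : List (List String)) :
    ∀ n, (pvTakePieces ps n).flatten = ps.flatten.take n := by
  induction ps with
  | nil => intro n; simp [pvTakePieces]
  | cons p ps ih =>
    intro n
    simp only [pvTakePieces, List.flatten_cons]
    split_ifs with h0 h1
    · simp [h0]
    · simp [List.take_append, ih, List.take_of_length_le h1]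
    · simp [List.take_append, Nat.sub_eq_zero_of_le (Nat.le_of_not_le h1)]
theorem flatten_pvDropPieces (ps : List (List String)) :
    ∀ n, (pvDropPieces ps n).flatten = ps.flatten.drop n := by
  induction ps with
  | nil => intro n; simp [pvDropPieces]
  | cons p ps ih =>
    intro n
    simp only [pvDropPieces, List.flatten_cons]
    split_ifs with h0
    · simp [List.drop_append, Nat.sub_eq_zero_of_le (Nat.le_of_lt h0)]
    · simp [List.drop_append, ih, List.drop_of_length_le (Nat.le_of_not_lt h0)]

theorem min?_map_add (l : List Int) (d : Int) :
    PySem.List.min? (l.map (fun n => n + d)) (fun y => y)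
      = (PySem.List.min? l (fun y => y)).map (fun n => n + d) := by
  cases l with
  | nil => rfl
  | cons x t =>
    simp only [List.map_cons, PySem.List.min?_id_cons, Option.map_some]
    congr 1
    induction t generalizing x with
    | nil => rfl
    | cons y t ih =>
      simp only [List.map_cons, List.foldl_cons]
      rw [min_add_add_right]
      exact ih (min x y)

theorem max?_map_add (l : List Int) (d : Int) :
    PySem.List.max? (l.map (fun n => n + d)) (fun y => y)
      = (PySem.List.max? l (fun y => y)).map (fun n => n + d) := by
  cases l with
  | nil => rfl
  | cons x t =>
    simp only [List.map_cons, PySem.List.max?_id_cons, Option.map_some]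
    congr 1
    induction t generalizing x with
    | nil => rfl
    | cons y t ih =>
      simp only [List.map_cons, List.foldl_cons]
      rw [max_add_add_right]
      exact ih (max x y)

theorem slice_none_some_eq (xs : List String) (b : Int) :
    PySem.List.slice xs none (some b) = xs.take (PySem.List.clampIdx xs.length b) := by
  simp [PySem.List.slice]

-- the per-step correspondence, then the loop invariant
theorem loop_invariant (m : List (String × List Int)) :
    ∀ (pieces : List (List String)) (diff : Int),
      (m.foldl
        (fun (st : List String × Int × Int) item =>
          let wl := st.1
          let length := st.2.1
          let diff := st.2.2
          let ix := item.2.map (fun n => n + diff)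
          match PySem.List.min? ix (fun y => y), PySem.List.max? ix (fun y => y) with
          | some lo, some hi =>
            let start := PySem.List.slice wl none (some lo)
            let end_ := PySem.List.slice wl (some (hi + 1)) none
            let wl' := start ++ [item.1] ++ end_
            (wl', (wl'.length : Int), (wl'.length : Int) - length)
          | _, _ => st)
        (pieces.flatten, (pieces.flatten.length : Int), diff)).1
      =
      (m.foldl
        (fun (st : List (List String) × Nat × Int) item =>
          let pieces := st.1
          let total := st.2.1
          let diff := st.2.2
          match PySem.List.min? item.2 (fun y => y) with
          | none => st
          | some mn =>
            match PySem.List.max? item.2 (fun y => y) with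
            | none => st
            | some mx =>
              let s := pvClamp (mn + diff) total
              let e := pvClamp (mx + diff + 1) total
              let pieces' := pvTakePieces pieces s ++ [item.1] :: pvDropPieces pieces e
              let total' := s + 1 + (total - e)
              (pieces', total', (total' : Int) - (total : Int)))
        (pieces, pieces.flatten.length, diff)).1.flatten := by
  induction m with
  | nil => intro pieces diff; rfl
  | cons item m ih =>
    intro pieces diff
    simp only [List.foldl_cons]
    rw [min?_map_add, max?_map_add]
    cases hmn : PySem.List.min? item.2 (fun y => y) with
    | none => exact ih pieces diff
    | some mn =>
      cases hmx : PySem.List.max? item.2 (fun y => y) with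
      | none => exact ih pieces diff
      | some mx =>
        simp only [Option.map_some]
        have hs : PySem.List.slice pieces.flatten none (some (mn + diff))
            = (pvTakePieces pieces (pvClamp (mn + diff) pieces.flatten.length)).flatten := by
          rw [slice_none_some_eq, flatten_pvTakePieces, pvClamp_eq]
        have he : PySem.List.slice pieces.flatten (some (mx + diff + 1)) none
            = (pvDropPieces pieces (pvClamp (mx + diff + 1) pieces.flatten.length)).flatten := by
          rw [PySem.List.slice_some_none, flatten_pvDropPieces, pvClamp_eq]
        set s := pvClamp (mn + diff) pieces.flatten.length with hsdef
        set e := pvClamp (mx + diff + 1) pieces.flatten.length with hedef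
        set pieces' := pvTakePieces pieces s ++ [item.1] :: pvDropPieces pieces e with hp'
        have hflat : PySem.List.slice pieces.flatten none (some (mn + diff)) ++ [item.1]
              ++ PySem.List.slice pieces.flatten (some (mx + diff + 1)) none
            = pieces'.flatten := by
          rw [hs, he, hp']
          simp
        have hlen : pieces'.flatten.length = s + 1 + (pieces.flatten.length - e) := by
          have h1 : s ≤ pieces.flatten.length := pvClamp_le _ _
          rw [hp', List.flatten_append, List.flatten_cons, flatten_pvTakePieces,
            flatten_pvDropPieces]
          simp only [List.length_append, List.length_take, List.length_drop,
            List.length_cons, List.length_nil, Nat.min_eq_left h1]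
          omega
        simp only [hflat, ← hlen]
        exact ih pieces' _

-- ===== VERDICT (by name: the statement is the Claim_ definition above) =====
theorem replace_string_numbers_with_numbers_spec : Claim_equal_replace_string_numbers_with_numbers := by
  intro word_list replace_index_map _ _
  unfold Spec_replace_string_numbers_with_numbers
  unfold replace_string_numbers_with_numbers replace_string_numbers_with_numbers_alt
  have h := loop_invariant replace_index_map [word_list] 0
  simpa using h
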